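-- pv_equiv track=rewrite | github.com/codepod-sandbox/numpy-rust | python/numpy/_datetime.py | _count_business_days_scalar
-- ===== SOURCE A (Python) =====
-- def _weekday_index(days):
--     return (int(days) + 3) % 7
--
-- def _is_business_day_scalar(day, weekmask, holidays):
--     if day is None:
--         return False
--     return weekmask[_weekday_index(day)] and day not in holidays
--
-- def _count_business_days_scalar(begin, end, weekmask, holidays):
--     if begin is None or end is None:
--         return 0
--     if begin == end:
--         return 0
--     step = 1 if end > begin else -1
--     count = 0
--     day = begin
--     while day != end:
--         if _is_business_day_scalar(day, weekmask, holidays):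
--             count += step
--         day += step
--     return count
-- ===== SOURCE B (Python) =====
-- def _count_business_days_scalar(begin, end, weekmask, holidays):
--     if begin is None or end is None or begin == end:
--         return 0
--     sign = 1 if end > begin else -1
--     if sign == 1:
--         a, b = begin, end
--     else:
--         a, b = end + 1, begin + 1
--     total = 0
--     for r in range(7):
--         if weekmask[r]:
--             m = r - 3
--             total += (b - 1 - m) // 7 - (a - 1 - m) // 7
--     for h in set(holidays).intersection(range(a, b)):
--         if weekmask[(h + 3) % 7]:
--             total -= 1
--     return sign * total
-- ===== Notes on version B (the rewrite author's own statement) =====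
-- stated objective: alternative
-- what changed: Replaces the day-by-day while loop (with a list-membership holiday test per day) by a closed-form floor-division count of days per weekday residue class plus one pass over the distinct holidays inside the range (set intersection); no per-day loop remains.
-- outside the precondition, e.g. on _count_business_days_scalar(4, 5, [True], set()): A returns 1, B raises IndexError
import Mathlib
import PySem

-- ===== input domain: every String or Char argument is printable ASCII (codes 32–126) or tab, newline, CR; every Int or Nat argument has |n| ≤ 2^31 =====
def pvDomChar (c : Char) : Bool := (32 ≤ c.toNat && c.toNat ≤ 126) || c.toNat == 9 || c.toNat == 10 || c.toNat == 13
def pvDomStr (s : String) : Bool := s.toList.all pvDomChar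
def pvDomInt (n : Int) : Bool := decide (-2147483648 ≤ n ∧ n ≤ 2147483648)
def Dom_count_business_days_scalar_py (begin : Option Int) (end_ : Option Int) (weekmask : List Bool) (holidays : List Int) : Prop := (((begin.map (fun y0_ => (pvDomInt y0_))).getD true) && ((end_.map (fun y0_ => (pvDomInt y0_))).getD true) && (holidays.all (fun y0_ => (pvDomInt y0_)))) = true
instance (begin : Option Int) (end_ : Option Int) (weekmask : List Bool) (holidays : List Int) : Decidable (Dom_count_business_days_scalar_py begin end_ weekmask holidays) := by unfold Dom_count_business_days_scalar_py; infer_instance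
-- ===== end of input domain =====

-- B replaces A's day-by-day walk over [begin,end) by a closed-form per-weekday-residue floor-division
-- count plus one pass over the distinct holidays lying in the range (objective: alternative algorithm).

-- ===== PORT A =====
-- _weekday_index(days) = (int(days) + 3) % 7
def pv_weekday_index (days : Int) : Int := PySem.Int.mod (days + 3) 7

-- _is_business_day_scalar; weekmask[idx] is total here via getD false, exact under Pre_ (index 0..6 < len)
def pv_is_business_day_scalar (day : Option Int) (weekmask : List Bool) (holidays : List Int) : Bool :=
  match day with
  | none => false
  | some d => ((PySem.List.pyGet? weekmask (pv_weekday_index d)).getD false) && !(holidays.contains d)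

-- the while loop of A; fuel = (end - day).natAbs, exactly the number of iterations (step is ±1 toward end)
def pvALoop (e step : Int) (weekmask : List Bool) (holidays : List Int) : Nat → Int → Int → Int
  | 0, _, count => count
  | Nat.succ n, day, count =>
    if day = e then count
    else pvALoop e step weekmask holidays n (day + step)
      (if pv_is_business_day_scalar (some day) weekmask holidays then count + step else count)

def count_business_days_scalar_py (begin : Option Int) (end_ : Option Int) (weekmask : List Bool) (holidays : List Int) : Int :=
  match begin, end_ with
  | none, _ => 0
  | _, none => 0
  | some bg, some en =>
    if bg = en then 0
    else
      let step : Int := if en > bg then 1 else -1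
      pvALoop en step weekmask holidays (en - bg).natAbs bg 0

-- ===== PORT B =====
-- weekmask[r]; total via getD false, exact under Pre_
def pvMaskAt (weekmask : List Bool) (r : Int) : Bool := (PySem.List.pyGet? weekmask r).getD false

-- (b - 1 - m) // 7  with m = r - 3
def pvCb (x r : Int) : Int := PySem.Int.floordiv (x - 1 - (r - 3)) 7

-- the 'for r in range(7)' loop of B
def pvWSum (weekmask : List Bool) (a b : Int) : Int :=
  (PySem.List.pyRange 0 7 1).foldl
    (fun t r => if pvMaskAt weekmask r then t + (pvCb b r - pvCb a r) else t) 0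

-- the 'for h in set(holidays).intersection(range(a, b))' loop of B
def pvHolFold (weekmask : List Bool) (t0 : Int) (hs : List Int) : Int :=
  hs.foldl (fun t h => if pvMaskAt weekmask (PySem.Int.mod (h + 3) 7) then t - 1 else t) t0

def count_business_days_scalar_py_alt (begin : Option Int) (end_ : Option Int) (weekmask : List Bool) (holidays : List Int) : Int :=
  match begin, end_ with
  | none, _ => 0
  | _, none => 0
  | some bg, some en =>
    if bg = en then 0
    else
      let sign : Int := if en > bg then 1 else -1
      let ab : Int × Int := if sign = 1 then (bg, en) else (en + 1, bg + 1)
      sign * pvHolFold weekmask (pvWSum weekmask ab.1 ab.2)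
        (PySem.Set.inter (PySem.Set.ofList holidays) (PySem.List.pyRange ab.1 ab.2 1))

-- ===== PRECONDITION & SPEC =====
-- Pre_ excludes weekmasks with fewer than 7 entries when the day range is nonempty: there Python A
-- raises IndexError as soon as the walk reaches a residue ≥ len(weekmask) (it returns only accidentally
-- on ranges that miss the missing residues), and B's residue loop raises IndexError outright.
def Pre_count_business_days_scalar_py (begin : Option Int) (end_ : Option Int) (weekmask : List Bool) (holidays : List Int) : Prop :=
  begin = none ∨ end_ = none ∨ begin = end_ ∨ 7 ≤ weekmask.length
instance (begin : Option Int) (end_ : Option Int) (weekmask : List Bool) (holidays : List Int) : Decidable (Pre_count_business_days_scalar_py begin end_ weekmask holidays) := by unfold Pre_count_business_days_scalar_py; infer_instance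

def pvWitness_count_business_days_scalar_py : Option Int × Option Int × List Bool × List Int :=
  (some 0, some 10, [true, true, true, true, true, false, false], [4])

def Spec_count_business_days_scalar_py (begin : Option Int) (end_ : Option Int) (weekmask : List Bool) (holidays : List Int) (out : Int) : Prop := out = count_business_days_scalar_py_alt begin end_ weekmask holidays
instance (begin : Option Int) (end_ : Option Int) (weekmask : List Bool) (holidays : List Int) (out : Int) : Decidable (Spec_count_business_days_scalar_py begin end_ weekmask holidays out) := by unfold Spec_count_business_days_scalar_py; infer_instance

-- ===== CLAIM (what is proved, stated in full; the proofs are below) =====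
def Claim_equal_count_business_days_scalar_py : Prop := ∀ (begin : Option Int) (end_ : Option Int) (weekmask : List Bool) (holidays : List Int), Dom_count_business_days_scalar_py begin end_ weekmask holidays → Pre_count_business_days_scalar_py begin end_ weekmask holidays → Spec_count_business_days_scalar_py begin end_ weekmask holidays (count_business_days_scalar_py begin end_ weekmask holidays)

-- ===== LEMMAS AND PROOFS =====

def pvBC (weekmask : List Bool) (holidays : List Int) (a : Int) : Nat → Int
  | 0 => 0
  | Nat.succ n => pvBC weekmask holidays a n +
      (if pv_is_business_day_scalar (some (a + n)) weekmask holidays then 1 else 0)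

lemma pvBC_front (wm : List Bool) (hol : List Int) : ∀ (n : Nat) (a : Int),
    pvBC wm hol a (n + 1) =
      (if pv_is_business_day_scalar (some a) wm hol then 1 else 0) + pvBC wm hol (a + 1) n := by
  intro n
  induction n with
  | zero => intro a; simp [pvBC]
  | succ n ih =>
    intro a
    have h1 : a + ((n : Int) + 1) = (a + 1) + (n : Int) := by ring
    calc pvBC wm hol a (n + 1 + 1)
        = pvBC wm hol a (n + 1) +
            (if pv_is_business_day_scalar (some (a + (n + 1 : Nat))) wm hol then 1 else 0) := rfl
      _ = (if pv_is_business_day_scalar (some a) wm hol then 1 else 0) + pvBC wm hol (a + 1) n +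
            (if pv_is_business_day_scalar (some ((a + 1) + (n : Int))) wm hol then 1 else 0) := by
            rw [ih]; push_cast; rw [h1]
      _ = _ := by rw [pvBC]; push_cast; ring
lemma pvALoop_up (wm : List Bool) (hol : List Int) : ∀ (n : Nat) (day c : Int),
    pvALoop (day + n) 1 wm hol n day c = c + pvBC wm hol day n := by
  intro n
  induction n with
  | zero => intro day c; simp [pvALoop, pvBC]
  | succ n ih =>
    intro day c
    have hne : day ≠ day + ((n : Nat) + 1 : Nat) := by push_cast; omega
    rw [pvALoop, if_neg hne]
    have he : day + ((n : Nat) + 1 : Nat) = (day + 1) + (n : Int) := by push_cast; ring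
    rw [he, ih, pvBC_front]
    by_cases h : pv_is_business_day_scalar (some day) wm hol <;> simp [h] <;> ring
lemma pvALoop_down (wm : List Bool) (hol : List Int) : ∀ (n : Nat) (e c : Int),
    pvALoop e (-1) wm hol n (e + n) c = c - pvBC wm hol (e + 1) n := by
  intro n
  induction n with
  | zero => intro e c; simp [pvALoop, pvBC]
  | succ n ih =>
    intro e c
    have hne : e + ((n : Nat) + 1 : Nat) ≠ e := by push_cast; omega
    rw [pvALoop, if_neg hne]
    have he : e + ((n : Nat) + 1 : Nat) + (-1) = e + (n : Int) := by push_cast; ring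
    have h3 : e + ((n : Nat) + 1 : Nat) = e + 1 + (n : Int) := by push_cast; ring
    rw [he, ih, pvBC, h3]
    by_cases h : pv_is_business_day_scalar (some (e + 1 + (n : Int))) wm hol <;> simp [h] <;> ring

lemma pvCb_step (x r : Int) (h0 : 0 ≤ r) (h7 : r < 7) :
    pvCb (x + 1) r - pvCb x r = if PySem.Int.mod (x + 3) 7 = r then 1 else 0 := by
  simp only [pvCb]
  rw [PySem.Int.floordiv_eq_ediv_of_pos (by norm_num), PySem.Int.floordiv_eq_ediv_of_pos (by norm_num),
      PySem.Int.mod_eq_emod_of_pos (by norm_num)]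
  split <;> omega
lemma pvWSum_eq_sum (wm : List Bool) (a b : Int) :
    pvWSum wm a b =
      (([0, 1, 2, 3, 4, 5, 6] : List Int).map
        (fun r => if pvMaskAt wm r then pvCb b r - pvCb a r else 0)).sum := by
  have hr : PySem.List.pyRange 0 7 1 = [0,1,2,3,4,5,6] := by decide
  simp only [pvWSum, hr, List.foldl_cons, List.foldl_nil, List.map_cons, List.map_nil,
    List.sum_cons, List.sum_nil]
  split_ifs <;> ring
lemma pvWSum_step (wm : List Bool) (a x : Int) :
    pvWSum wm a (x + 1) = pvWSum wm a x +
      (if pvMaskAt wm (PySem.Int.mod (x + 3) 7) then 1 else 0) := by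
  have hb0 : (0:Int) ≤ PySem.Int.mod (x + 3) 7 := PySem.Int.mod_nonneg _ (by norm_num)
  have hb7 : PySem.Int.mod (x + 3) 7 < 7 := PySem.Int.mod_lt _ (by norm_num)
  have h0 := pvCb_step x 0 (by norm_num) (by norm_num)
  have h1 := pvCb_step x 1 (by norm_num) (by norm_num)
  have h2 := pvCb_step x 2 (by norm_num) (by norm_num)
  have h3 := pvCb_step x 3 (by norm_num) (by norm_num)
  have h4 := pvCb_step x 4 (by norm_num) (by norm_num)
  have h5 := pvCb_step x 5 (by norm_num) (by norm_num)
  have h6 := pvCb_step x 6 (by norm_num) (by norm_num)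
  have hcase : PySem.Int.mod (x + 3) 7 = 0 ∨ PySem.Int.mod (x + 3) 7 = 1 ∨ PySem.Int.mod (x + 3) 7 = 2 ∨ PySem.Int.mod (x + 3) 7 = 3 ∨ PySem.Int.mod (x + 3) 7 = 4 ∨ PySem.Int.mod (x + 3) 7 = 5 ∨ PySem.Int.mod (x + 3) 7 = 6 := by omega
  rcases hcase with hm | hm | hm | hm | hm | hm | hm
  · rw [hm] at h0 h1 h2 h3 h4 h5 h6
    norm_num at h0 h1 h2 h3 h4 h5 h6
    have e0 : pvCb (x + 1) 0 = pvCb x 0 + 1 := by omega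
    have e1 : pvCb (x + 1) 1 = pvCb x 1 := by omega
    have e2 : pvCb (x + 1) 2 = pvCb x 2 := by omega
    have e3 : pvCb (x + 1) 3 = pvCb x 3 := by omega
    have e4 : pvCb (x + 1) 4 = pvCb x 4 := by omega
    have e5 : pvCb (x + 1) 5 = pvCb x 5 := by omega
    have e6 : pvCb (x + 1) 6 = pvCb x 6 := by omega
    rw [pvWSum_eq_sum, pvWSum_eq_sum, hm]
    simp only [List.map_cons, List.map_nil, List.sum_cons, List.sum_nil]
    rw [e0, e1, e2, e3, e4, e5, e6]
    by_cases hM : pvMaskAt wm 0 = true <;> simp [hM] <;> ring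
  · rw [hm] at h0 h1 h2 h3 h4 h5 h6
    norm_num at h0 h1 h2 h3 h4 h5 h6
    have e0 : pvCb (x + 1) 0 = pvCb x 0 := by omega
    have e1 : pvCb (x + 1) 1 = pvCb x 1 + 1 := by omega
    have e2 : pvCb (x + 1) 2 = pvCb x 2 := by omega
    have e3 : pvCb (x + 1) 3 = pvCb x 3 := by omega
    have e4 : pvCb (x + 1) 4 = pvCb x 4 := by omega
    have e5 : pvCb (x + 1) 5 = pvCb x 5 := by omega
    have e6 : pvCb (x + 1) 6 = pvCb x 6 := by omega
    rw [pvWSum_eq_sum, pvWSum_eq_sum, hm]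
    simp only [List.map_cons, List.map_nil, List.sum_cons, List.sum_nil]
    rw [e0, e1, e2, e3, e4, e5, e6]
    by_cases hM : pvMaskAt wm 1 = true <;> simp [hM] <;> ring
  · rw [hm] at h0 h1 h2 h3 h4 h5 h6
    norm_num at h0 h1 h2 h3 h4 h5 h6
    have e0 : pvCb (x + 1) 0 = pvCb x 0 := by omega
    have e1 : pvCb (x + 1) 1 = pvCb x 1 := by omega
    have e2 : pvCb (x + 1) 2 = pvCb x 2 + 1 := by omega
    have e3 : pvCb (x + 1) 3 = pvCb x 3 := by omega
    have e4 : pvCb (x + 1) 4 = pvCb x 4 := by omega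
    have e5 : pvCb (x + 1) 5 = pvCb x 5 := by omega
    have e6 : pvCb (x + 1) 6 = pvCb x 6 := by omega
    rw [pvWSum_eq_sum, pvWSum_eq_sum, hm]
    simp only [List.map_cons, List.map_nil, List.sum_cons, List.sum_nil]
    rw [e0, e1, e2, e3, e4, e5, e6]
    by_cases hM : pvMaskAt wm 2 = true <;> simp [hM] <;> ring
  · rw [hm] at h0 h1 h2 h3 h4 h5 h6
    norm_num at h0 h1 h2 h3 h4 h5 h6
    have e0 : pvCb (x + 1) 0 = pvCb x 0 := by omega
    have e1 : pvCb (x + 1) 1 = pvCb x 1 := by omega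
    have e2 : pvCb (x + 1) 2 = pvCb x 2 := by omega
    have e3 : pvCb (x + 1) 3 = pvCb x 3 + 1 := by omega
    have e4 : pvCb (x + 1) 4 = pvCb x 4 := by omega
    have e5 : pvCb (x + 1) 5 = pvCb x 5 := by omega
    have e6 : pvCb (x + 1) 6 = pvCb x 6 := by omega
    rw [pvWSum_eq_sum, pvWSum_eq_sum, hm]
    simp only [List.map_cons, List.map_nil, List.sum_cons, List.sum_nil]
    rw [e0, e1, e2, e3, e4, e5, e6]
    by_cases hM : pvMaskAt wm 3 = true <;> simp [hM] <;> ring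
  · rw [hm] at h0 h1 h2 h3 h4 h5 h6
    norm_num at h0 h1 h2 h3 h4 h5 h6
    have e0 : pvCb (x + 1) 0 = pvCb x 0 := by omega
    have e1 : pvCb (x + 1) 1 = pvCb x 1 := by omega
    have e2 : pvCb (x + 1) 2 = pvCb x 2 := by omega
    have e3 : pvCb (x + 1) 3 = pvCb x 3 := by omega
    have e4 : pvCb (x + 1) 4 = pvCb x 4 + 1 := by omega
    have e5 : pvCb (x + 1) 5 = pvCb x 5 := by omega
    have e6 : pvCb (x + 1) 6 = pvCb x 6 := by omega
    rw [pvWSum_eq_sum, pvWSum_eq_sum, hm]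
    simp only [List.map_cons, List.map_nil, List.sum_cons, List.sum_nil]
    rw [e0, e1, e2, e3, e4, e5, e6]
    by_cases hM : pvMaskAt wm 4 = true <;> simp [hM] <;> ring
  · rw [hm] at h0 h1 h2 h3 h4 h5 h6
    norm_num at h0 h1 h2 h3 h4 h5 h6
    have e0 : pvCb (x + 1) 0 = pvCb x 0 := by omega
    have e1 : pvCb (x + 1) 1 = pvCb x 1 := by omega
    have e2 : pvCb (x + 1) 2 = pvCb x 2 := by omega
    have e3 : pvCb (x + 1) 3 = pvCb x 3 := by omega
    have e4 : pvCb (x + 1) 4 = pvCb x 4 := by omega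
    have e5 : pvCb (x + 1) 5 = pvCb x 5 + 1 := by omega
    have e6 : pvCb (x + 1) 6 = pvCb x 6 := by omega
    rw [pvWSum_eq_sum, pvWSum_eq_sum, hm]
    simp only [List.map_cons, List.map_nil, List.sum_cons, List.sum_nil]
    rw [e0, e1, e2, e3, e4, e5, e6]
    by_cases hM : pvMaskAt wm 5 = true <;> simp [hM] <;> ring
  · rw [hm] at h0 h1 h2 h3 h4 h5 h6
    norm_num at h0 h1 h2 h3 h4 h5 h6
    have e0 : pvCb (x + 1) 0 = pvCb x 0 := by omega
    have e1 : pvCb (x + 1) 1 = pvCb x 1 := by omega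
    have e2 : pvCb (x + 1) 2 = pvCb x 2 := by omega
    have e3 : pvCb (x + 1) 3 = pvCb x 3 := by omega
    have e4 : pvCb (x + 1) 4 = pvCb x 4 := by omega
    have e5 : pvCb (x + 1) 5 = pvCb x 5 := by omega
    have e6 : pvCb (x + 1) 6 = pvCb x 6 + 1 := by omega
    rw [pvWSum_eq_sum, pvWSum_eq_sum, hm]
    simp only [List.map_cons, List.map_nil, List.sum_cons, List.sum_nil]
    rw [e0, e1, e2, e3, e4, e5, e6]
    by_cases hM : pvMaskAt wm 6 = true <;> simp [hM] <;> ring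

lemma pvHolFold_eq (wm : List Bool) : ∀ (hs : List Int) (t0 : Int),
    pvHolFold wm t0 hs =
      t0 - (hs.countP (fun h => pvMaskAt wm (PySem.Int.mod (h + 3) 7))) := by
  intro hs
  induction hs with
  | nil => intro t0; simp [pvHolFold]
  | cons x t ih =>
    intro t0
    simp only [pvHolFold] at ih ⊢
    rw [List.foldl_cons, List.countP_cons]
    by_cases hc : pvMaskAt wm (PySem.Int.mod (x + 3) 7) = true
    · rw [if_pos hc, ih, hc]
      norm_num
      omega
    · have hc' : pvMaskAt wm (PySem.Int.mod (x + 3) 7) = false := by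
        cases hx : pvMaskAt wm (PySem.Int.mod (x + 3) 7)
        · rfl
        · exact absurd hx hc
      rw [if_neg hc, ih, hc']
      norm_num

lemma pv_count_inter (wm : List Bool) (hol : List Int) (a b : Int) :
    List.countP (fun h => pvMaskAt wm (PySem.Int.mod (h + 3) 7))
        (PySem.Set.inter (PySem.Set.ofList hol) (PySem.List.pyRange a b 1)) =
      List.countP (fun h => decide (a ≤ h ∧ h < b ∧ pvMaskAt wm (PySem.Int.mod (h + 3) 7) = true))
        (PySem.Set.ofList hol) := by
  have hf : PySem.Set.inter (PySem.Set.ofList hol) (PySem.List.pyRange a b 1)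
      = (PySem.Set.ofList hol).filter (fun x => (PySem.List.pyRange a b 1).contains x) := by
    simp [PySem.Set.inter]
  rw [hf, List.countP_filter]
  apply List.countP_congr
  intro h _
  simp only [Bool.and_eq_true, decide_eq_true_eq, List.contains_iff_mem, PySem.List.mem_pyRange_one]
  constructor
  · rintro ⟨hm, h1, h2⟩; exact ⟨h1, h2, hm⟩
  · rintro ⟨h1, h2, hm⟩; exact ⟨hm, h1, h2⟩

lemma pv_countP_window_step (a : Int) (n : Nat) (mk : Int → Bool) :
    ∀ (l : List Int), l.Nodup →
      (l.countP (fun h => decide (a ≤ h ∧ h < a + (n : Int) + 1 ∧ mk h = true)) : Int) =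
        (l.countP (fun h => decide (a ≤ h ∧ h < a + (n : Int) ∧ mk h = true)) : Int) +
          (if (a + (n : Int)) ∈ l ∧ mk (a + (n : Int)) = true then 1 else 0) := by
  intro l
  induction l with
  | nil => simp
  | cons x t ih =>
    intro hnd
    have hx : x ∉ t := (List.nodup_cons.mp hnd).1
    have ht : t.Nodup := (List.nodup_cons.mp hnd).2
    have hih := ih ht
    rw [List.countP_cons, List.countP_cons]
    by_cases hxa : x = a + (n : Int)
    · subst hxa
      have hq : ¬ (a ≤ (a + (n : Int)) ∧ (a + (n : Int)) < a + (n : Int) ∧ mk (a + (n : Int)) = true) := by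
        rintro ⟨-, hv, -⟩; omega
      have hmemt : ¬ (((a + (n : Int)) ∈ t) ∧ mk (a + (n : Int)) = true) := fun h => hx h.1
      rw [if_neg hmemt] at hih
      have hmemc : (((a + (n : Int)) ∈ (a + (n : Int)) :: t) ∧ mk (a + (n : Int)) = true) ↔ (mk (a + (n : Int)) = true) := by
        simp [List.mem_cons]
      by_cases hmk : mk (a + (n : Int)) = true
      · have hp1 : (a ≤ (a + (n : Int)) ∧ (a + (n : Int)) < a + (n : Int) + 1 ∧ mk (a + (n : Int)) = true) := ⟨by omega, by omega, hmk⟩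
        rw [decide_eq_true hp1, decide_eq_false hq, if_pos (hmemc.mpr hmk)]
        simp only [eq_self_iff_true, if_true, Bool.false_eq_true, if_false]
        push_cast
        omega
      · have hp1 : ¬ (a ≤ (a + (n : Int)) ∧ (a + (n : Int)) < a + (n : Int) + 1 ∧ mk (a + (n : Int)) = true) := fun h => hmk h.2.2
        rw [decide_eq_false hp1, decide_eq_false hq, if_neg (fun h => hmk (hmemc.mp h))]
        simp only [eq_self_iff_true, if_true, Bool.false_eq_true, if_false]
        push_cast
        omega
    · have hp : (a ≤ x ∧ x < a + (n : Int) + 1 ∧ mk x = true) ↔ (a ≤ x ∧ x < a + (n : Int) ∧ mk x = true) := by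
        constructor <;> rintro ⟨u, v, w⟩ <;> exact ⟨u, by omega, w⟩
      have hmem : (((a + (n : Int)) ∈ x :: t) ∧ mk (a + (n : Int)) = true) ↔ (((a + (n : Int)) ∈ t) ∧ mk (a + (n : Int)) = true) := by
        constructor
        · rintro ⟨h1, h2⟩
          rcases List.mem_cons.mp h1 with h | h
          · exact absurd h.symm hxa
          · exact ⟨h, h2⟩
        · rintro ⟨h1, h2⟩; exact ⟨List.mem_cons.mpr (Or.inr h1), h2⟩
      rw [if_congr hmem rfl rfl]
      by_cases hq : a ≤ x ∧ x < a + (n : Int) ∧ mk x = true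
      · rw [decide_eq_true (hp.mpr hq), decide_eq_true hq]
        simp only [eq_self_iff_true, if_true, Bool.false_eq_true, if_false]
        push_cast
        omega
      · rw [decide_eq_false (fun h => hq (hp.mp h)), decide_eq_false hq]
        simp only [eq_self_iff_true, if_true, Bool.false_eq_true, if_false]
        push_cast
        omega

lemma pvWSum_self (wm : List Bool) (a : Int) : pvWSum wm a a = 0 := by
  rw [pvWSum_eq_sum]
  simp

lemma pv_closed_form (wm : List Bool) (hol : List Int) : ∀ (n : Nat) (a : Int),
    pvHolFold wm (pvWSum wm a (a + n)) (PySem.Set.inter (PySem.Set.ofList hol) (PySem.List.pyRange a (a + n) 1)) = pvBC wm hol a n := by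
  intro n
  induction n with
  | zero =>
    intro a
    rw [pvHolFold_eq, pv_count_inter]
    have hz : (PySem.Set.ofList hol).countP
        (fun h => decide (a ≤ h ∧ h < a + ((0 : Nat) : Int) ∧ pvMaskAt wm (PySem.Int.mod (h + 3) 7) = true)) = 0 := by
      apply List.countP_eq_zero.mpr
      intro h _
      simp only [decide_eq_true_eq]
      rintro ⟨h1, h2, -⟩
      omega
    rw [hz]
    simp [pvWSum_self, pvBC]
  | succ n ih =>
    intro a
    have hb : a + ((n + 1 : Nat) : Int) = (a + (n : Int)) + 1 := by push_cast; ring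
    rw [pvHolFold_eq, pv_count_inter, hb, pvWSum_step]
    have hw := pv_countP_window_step a n (fun h => pvMaskAt wm (PySem.Int.mod (h + 3) 7)) (PySem.Set.ofList hol) (PySem.Set.nodup_ofList hol)
    beta_reduce at hw
    have hih := ih a
    rw [pvHolFold_eq, pv_count_inter] at hih
    have hmem : ((a + (n : Int)) ∈ PySem.Set.ofList hol) ↔ ((a + (n : Int)) ∈ hol) := PySem.Set.mem_ofList _ _
    have hbc : pvBC wm hol a (n + 1) = pvBC wm hol a n +
        (if pv_is_business_day_scalar (some (a + (n : Int))) wm hol then 1 else 0) := rfl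
    rw [hbc, ← hih]
    have hB : pv_is_business_day_scalar (some (a + (n : Int))) wm hol =
        (pvMaskAt wm (PySem.Int.mod ((a + (n : Int)) + 3) 7) && !(hol.contains (a + (n : Int)))) := rfl
    by_cases hmk : pvMaskAt wm (PySem.Int.mod ((a + (n : Int)) + 3) 7) = true
    · by_cases hin : (a + (n : Int)) ∈ hol
      · have h1 : pv_is_business_day_scalar (some (a + (n : Int))) wm hol = false := by
          rw [hB, hmk]
          have hc : hol.contains (a + (n : Int)) = true := by simpa using hin
          rw [hc]
          rfl
        have h2 : ((a + (n : Int)) ∈ PySem.Set.ofList hol ∧ pvMaskAt wm (PySem.Int.mod ((a + (n : Int)) + 3) 7) = true) := ⟨hmem.mpr hin, hmk⟩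
        rw [if_pos h2] at hw
        rw [h1, hmk]
        simp only [if_true, Bool.false_eq_true, if_false]
        omega
      · have h1 : pv_is_business_day_scalar (some (a + (n : Int))) wm hol = true := by
          rw [hB, hmk]
          have hc : hol.contains (a + (n : Int)) = false := by simpa using hin
          rw [hc]
          rfl
        have h2 : ¬ ((a + (n : Int)) ∈ PySem.Set.ofList hol ∧ pvMaskAt wm (PySem.Int.mod ((a + (n : Int)) + 3) 7) = true) := by
          rintro ⟨hm1, -⟩; exact hin (hmem.mp hm1)
        rw [if_neg h2] at hw
        rw [h1, hmk]
        simp only [if_true]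
        omega
    · have hmk' : pvMaskAt wm (PySem.Int.mod ((a + (n : Int)) + 3) 7) = false := by
        cases hx : pvMaskAt wm (PySem.Int.mod ((a + (n : Int)) + 3) 7)
        · rfl
        · exact absurd hx hmk
      have h1 : pv_is_business_day_scalar (some (a + (n : Int))) wm hol = false := by
        rw [hB, hmk']
        rfl
      have h2 : ¬ ((a + (n : Int)) ∈ PySem.Set.ofList hol ∧ pvMaskAt wm (PySem.Int.mod ((a + (n : Int)) + 3) 7) = true) := by
        rintro ⟨-, hm2⟩; exact hmk hm2
      rw [if_neg h2] at hw
      rw [h1]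
      simp only [Bool.false_eq_true, if_false]
      rw [hmk']
      simp only [Bool.false_eq_true, if_false]
      omega

-- ===== VERDICT (by name: the statement is the Claim_ definition above) =====
theorem count_business_days_scalar_py_spec : Claim_equal_count_business_days_scalar_py := by
  intro bg en wm hol hDom hPre
  unfold Spec_count_business_days_scalar_py
  cases bg with
  | none => rfl
  | some bg =>
    cases en with
    | none => rfl
    | some en =>
      simp only [count_business_days_scalar_py, count_business_days_scalar_py_alt]
      by_cases hbe : bg = en
      · simp [hbe]
      · rw [if_neg hbe, if_neg hbe]
        by_cases hgt : en > bg
        · rw [if_pos hgt]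
          norm_num
          set n : Nat := (en - bg).toNat with hn
          have hen : en = bg + (n : Int) := by omega
          have hna : (en - bg).natAbs = n := by omega
          rw [hna, hen, pvALoop_up, pv_closed_form]
          simp
        · rw [if_neg hgt]
          norm_num
          set n : Nat := (bg - en).toNat with hn
          have hbg : bg = en + (n : Int) := by omega
          have hna : (en - bg).natAbs = n := by omega
          rw [hna, hbg, pvALoop_down]
          have hb1 : en + (n : Int) + 1 = (en + 1) + (n : Int) := by ring
          rw [hb1, pv_closed_form]
          ring
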